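-- pv_equiv track=rewrite | github.com/heroleggo/codetree-TILs | 240927/금 채굴하기/gold-mining.py | func
-- ===== SOURCE A (Python) =====
-- def getValue(data, value):
--     result = 0
--     for i in range(len(data)):
--         for j in range(len(data)):
--             if data[i][j] == 1:
--                 result += value
--     return result
--
-- def getCost(size):
--     return size ** 2 + (size + 1) ** 2
--
-- def calc(data, r, c, size):
--     result = 0
--     if size == 0:
--         return 1 if data[r - 1][c - 1] == 1 else 0
--     for i in range(max(0, (r - 1) - size), min(len(data), r + size)):
--         for j in range(max(0, (c - 1) - size), min(len(data), c + size)):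
--             diff = abs(r - i - 1) + abs(c - j - 1)
--             if data[i][j] == 1 and diff <= size:
--                 result += 1
--     return result
--
-- def func(data, size, value):
--     maxValue = getValue(data, value)
--     result = 0
--     for i in range(1, len(data) + 1):
--         for j in range(1, len(data) + 1):
--             size = 0
--             while True:
--                 cost = getCost(size)
--                 if cost > maxValue:
--                     break
--                 else:
--                     calculatedCount = calc(data, i, j, size)
--                     if calculatedCount * value >= cost:
--                         result = max(calculatedCount, result)
--                     size += 1
--     return result
-- ===== SOURCE B (Python) =====
-- def getCost(size):
--     return size ** 2 + (size + 1) ** 2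
--
--
-- def func(data, size, value):
--     # Per centre: one pass building a Manhattan-distance histogram of the ones,
--     # then a prefix-accumulating sweep over the O(n) useful sizes (every diamond
--     # of size >= 2n-2 already contains the whole grid).
--     n = len(data)
--     ones = [(i, j) for i in range(n) for j in range(n) if data[i][j] == 1]
--     maxValue = len(ones) * value
--     best = 0
--     for r in range(1, n + 1):
--         for c in range(1, n + 1):
--             hist = {}
--             for (i, j) in ones:
--                 d = abs(r - 1 - i) + abs(c - 1 - j)
--                 hist[d] = hist.get(d, 0) + 1
--             running = 0
--             for d in range(2 * n - 1):
--                 running += hist.get(d, 0)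
--                 cost = getCost(d)
--                 if cost <= maxValue and running * value >= cost:
--                     best = max(best, running)
--     return best
-- ===== Notes on version B (the rewrite author's own statement) =====
-- stated objective: faster
-- what changed: Instead of rescanning a clamped (2s+1)x(2s+1) window for every centre and every affordable size, B collects the ones once, builds per centre a Manhattan-distance histogram of them in one pass, and sweeps sizes 0..2n-2 (beyond which the diamond covers the whole grid) with a running prefix count.
import Mathlib
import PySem

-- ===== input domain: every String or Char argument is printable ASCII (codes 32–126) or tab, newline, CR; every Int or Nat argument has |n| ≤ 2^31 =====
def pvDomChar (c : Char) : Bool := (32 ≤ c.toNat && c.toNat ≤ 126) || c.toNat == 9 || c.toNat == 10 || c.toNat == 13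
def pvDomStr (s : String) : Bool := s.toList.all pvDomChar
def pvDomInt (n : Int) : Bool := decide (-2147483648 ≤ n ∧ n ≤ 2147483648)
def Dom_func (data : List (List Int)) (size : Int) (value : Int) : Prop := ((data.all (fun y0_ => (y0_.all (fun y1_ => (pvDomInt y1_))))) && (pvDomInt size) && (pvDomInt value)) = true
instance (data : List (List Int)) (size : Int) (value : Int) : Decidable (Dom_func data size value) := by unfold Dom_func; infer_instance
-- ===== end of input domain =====

-- B replaces A's per-(centre,size) clamped-window rescan by, per centre, one
-- Manhattan-distance histogram of the ones plus a prefix-accumulating sweep over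
-- the O(n) useful sizes (objective: faster).

-- ===== PORT A =====

-- data[i][j] (both Pythons index the grid the same way; in range under Pre_func)
def pvAt (data : List (List Int)) (i j : Int) : Int :=
  PySem.List.pyGetD (PySem.List.pyGetD data i []) j 0

def getValueA (data : List (List Int)) (value : Int) : Int :=
  (PySem.List.pyRange 0 (data.length : Int) 1).foldl (fun result i =>
    (PySem.List.pyRange 0 (data.length : Int) 1).foldl (fun result j =>
      if pvAt data i j = 1 then result + value else result) result) 0

def getCostA (size : Int) : Int := size ^ 2 + (size + 1) ^ 2

def calcA (data : List (List Int)) (r c size : Int) : Int :=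
  if size = 0 then (if pvAt data (r - 1) (c - 1) = 1 then 1 else 0)
  else
    (PySem.List.pyRange (max 0 ((r - 1) - size)) (min (data.length : Int) (r + size)) 1).foldl
      (fun result i =>
        (PySem.List.pyRange (max 0 ((c - 1) - size)) (min (data.length : Int) (c + size)) 1).foldl
          (fun result j =>
            if pvAt data i j = 1 ∧ |r - i - 1| + |c - j - 1| ≤ size then result + 1 else result)
          result)
      0

-- termination of A's 'while True': each pass needs getCost size ≤ maxValue, and getCost size ≥ size + 1
theorem getCostA_ge (size : Int) : size + 1 ≤ getCostA size := by
  unfold getCostA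
  have h : 0 ≤ size ∨ size + 1 ≤ 0 := by omega
  rcases h with h | h <;> nlinarith

def whileA (data : List (List Int)) (value maxValue r c : Int) (size result : Int) : Int :=
  if getCostA size > maxValue then result
  else
    whileA data value maxValue r c (size + 1)
      (if calcA data r c size * value ≥ getCostA size then max (calcA data r c size) result
       else result)
termination_by (maxValue + 1 - size).toNat
decreasing_by
  have h1 := getCostA_ge size
  simp only [not_lt] at *
  omega

def func (data : List (List Int)) (size : Int) (value : Int) : Int :=
  let maxValue := getValueA data value
  (PySem.List.pyRange 1 ((data.length : Int) + 1) 1).foldl (fun result i =>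
    (PySem.List.pyRange 1 ((data.length : Int) + 1) 1).foldl (fun result j =>
      whileA data value maxValue i j 0 result) result) 0

-- ===== PORT B =====

def getCostB (size : Int) : Int := size ^ 2 + (size + 1) ^ 2

-- [(i, j) for i in range(n) for j in range(n) if data[i][j] == 1]
def onesB (data : List (List Int)) : List (Int × Int) :=
  (PySem.List.pyRange 0 (data.length : Int) 1).flatMap (fun i =>
    ((PySem.List.pyRange 0 (data.length : Int) 1).filter (fun j => pvAt data i j == 1)).map
      (fun j => (i, j)))

-- hist[d] = hist.get(d, 0) + 1 over the ones, for a given centre (r, c)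
def histB (ones : List (Int × Int)) (r c : Int) : PySem.Dict Int Int :=
  ones.foldl (fun h p =>
    h.insert (|r - 1 - p.1| + |c - 1 - p.2|) (h.getD (|r - 1 - p.1| + |c - 1 - p.2|) 0 + 1))
    PySem.Dict.empty

def func_alt (data : List (List Int)) (size : Int) (value : Int) : Int :=
  let n : Int := (data.length : Int)
  let ones := onesB data
  let maxValue : Int := (ones.length : Int) * value
  (PySem.List.pyRange 1 (n + 1) 1).foldl (fun best r =>
    (PySem.List.pyRange 1 (n + 1) 1).foldl (fun best c =>
      let hist := histB ones r c
      ((PySem.List.pyRange 0 (2 * n - 1) 1).foldl (fun (st : Int × Int) d =>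
          let running := st.1 + hist.getD d 0
          (running,
           if getCostB d ≤ maxValue ∧ running * value ≥ getCostB d then max st.2 running
           else st.2))
        ((0 : Int), best)).2) best) 0

-- ===== PRECONDITION & SPEC =====
-- Pre_ excludes ragged grids having a row shorter than len(data), on which the Python A
-- (and B alike) raises IndexError.
def Pre_func (data : List (List Int)) (size : Int) (value : Int) : Prop :=
  ∀ row ∈ data, data.length ≤ row.length
instance (data : List (List Int)) (size : Int) (value : Int) : Decidable (Pre_func data size value) := by unfold Pre_func; infer_instance

def pvWitness_func : List (List Int) × Int × Int := ([[1, 0], [0, 1]], 0, 2)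

def Spec_func (data : List (List Int)) (size : Int) (value : Int) (out : Int) : Prop := out = func_alt data size value
instance (data : List (List Int)) (size : Int) (value : Int) (out : Int) : Decidable (Spec_func data size value out) := by unfold Spec_func; infer_instance

-- ===== CLAIM (what is proved, stated in full; the proofs are below) =====
def Claim_equal_func : Prop := ∀ (data : List (List Int)) (size : Int) (value : Int), Dom_func data size value → Pre_func data size value → Spec_func data size value (func data size value)

-- ===== LEMMAS AND PROOFS =====

-- Manhattan distance of a one from the centre (r, c) of A's 1-based sweep
def pvDist (r c : Int) (p : Int × Int) : Int := |r - 1 - p.1| + |c - 1 - p.2|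

-- number of ones within distance s of centre (r, c)
def pvCnt (data : List (List Int)) (r c s : Int) : Int :=
  ((onesB data).countP (fun p => pvDist r c p ≤ s) : Int)

-- the common abstract step both loops perform at size d
def pvStep (data : List (List Int)) (value M r c : Int) (acc d : Int) : Int :=
  if getCostB d ≤ M ∧ pvCnt data r c d * value ≥ getCostB d then max acc (pvCnt data r c d)
  else acc

theorem getCostB_mono {t s : Int} (h0 : 0 ≤ t) (h : t ≤ s) : getCostB t ≤ getCostB s := by
  unfold getCostB; nlinarith

theorem pvCnt_neg (data : List (List Int)) (r c s : Int) (h : s < 0) :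
    pvCnt data r c s = 0 := by
  unfold pvCnt
  rw [List.countP_eq_zero.mpr]
  · rfl
  · intro p _
    simp only [pvDist, decide_eq_true_eq, not_le]
    have h1 := abs_nonneg (r - 1 - p.1)
    have h2 := abs_nonneg (c - 1 - p.2)
    omega

theorem countP_dist_succ (r c d : Int) (l : List (Int × Int)) :
    l.countP (fun p => pvDist r c p ≤ d)
      = l.countP (fun p => pvDist r c p ≤ d - 1) + l.countP (fun p => pvDist r c p == d) := by
  induction l with
  | nil => rfl
  | cons a t ih =>
    simp only [List.countP_cons, ih]
    by_cases h2 : pvDist r c a = d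
    · have h1 : (pvDist r c a == d) = true := by simp [h2]
      have e1 : decide (pvDist r c a ≤ d) = true := by simp; omega
      have e2 : decide (pvDist r c a ≤ d - 1) = false := by simp; omega
      rw [h1, e1, e2]
      simp; omega
    · have h1 : (pvDist r c a == d) = false := by simp [h2]
      have e3 : decide (pvDist r c a ≤ d) = decide (pvDist r c a ≤ d - 1) := by
        by_cases h3 : pvDist r c a ≤ d - 1
        · have : pvDist r c a ≤ d := by omega
          simp [h3, this]
        · have : ¬ pvDist r c a ≤ d := by omega
          simp [h3, this]
      rw [h1, e3]
      simp
      omega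

theorem pvCnt_succ (data : List (List Int)) (r c d : Int) :
    pvCnt data r c d
      = pvCnt data r c (d - 1) + ((onesB data).countP (fun p => pvDist r c p == d) : Int) := by
  unfold pvCnt
  rw [countP_dist_succ]
  push_cast
  ring

theorem mem_onesB {data : List (List Int)} {p : Int × Int} (hp : p ∈ onesB data) :
    0 ≤ p.1 ∧ p.1 < (data.length : Int) ∧ 0 ≤ p.2 ∧ p.2 < (data.length : Int) := by
  unfold onesB at hp
  simp only [List.mem_flatMap, List.mem_map, List.mem_filter] at hp
  obtain ⟨i, hi, j, ⟨hj, _⟩, rfl⟩ := hp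
  rw [PySem.List.mem_pyRange_one] at hi hj
  exact ⟨hi.1, hi.2, hj.1, hj.2⟩

theorem pvDist_le_cap {data : List (List Int)} {r c : Int} {p : Int × Int}
    (hp : p ∈ onesB data) (hr1 : 1 ≤ r) (hr2 : r ≤ (data.length : Int))
    (hc1 : 1 ≤ c) (hc2 : c ≤ (data.length : Int)) :
    pvDist r c p ≤ 2 * (data.length : Int) - 2 := by
  obtain ⟨h1, h2, h3, h4⟩ := mem_onesB hp
  unfold pvDist
  have a1 : |r - 1 - p.1| ≤ (data.length : Int) - 1 := by
    rw [abs_le]; omega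
  have a2 : |c - 1 - p.2| ≤ (data.length : Int) - 1 := by
    rw [abs_le]; omega
  omega

theorem pvCnt_cap {data : List (List Int)} {r c s : Int} (hr1 : 1 ≤ r)
    (hr2 : r ≤ (data.length : Int)) (hc1 : 1 ≤ c) (hc2 : c ≤ (data.length : Int))
    (hs : 2 * (data.length : Int) - 2 ≤ s) :
    pvCnt data r c s = pvCnt data r c (2 * (data.length : Int) - 2) := by
  unfold pvCnt
  congr 1
  apply List.countP_congr
  intro p hp
  have := pvDist_le_cap hp hr1 hr2 hc1 hc2
  simp only [decide_eq_true_eq]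
  constructor <;> intro <;> omega

theorem countP_pyRange_extend (q : Int → Bool) {a b a' b' : Int} (h1 : a' ≤ a) (h2 : a ≤ b)
    (h3 : b ≤ b') (hlo : ∀ x, a' ≤ x → x < a → q x = false)
    (hhi : ∀ x, b ≤ x → x < b' → q x = false) :
    (PySem.List.pyRange a' b' 1).countP q = (PySem.List.pyRange a b 1).countP q := by
  rw [PySem.List.pyRange_one_append a' a b' h1 (h2.trans h3),
      PySem.List.pyRange_one_append a b b' h2 h3]
  rw [List.countP_append, List.countP_append]
  have z1 : (PySem.List.pyRange a' a 1).countP q = 0 := by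
    rw [List.countP_eq_zero]
    intro x hx
    rw [PySem.List.mem_pyRange_one] at hx
    simp [hlo x hx.1 hx.2]
  have z2 : (PySem.List.pyRange b b' 1).countP q = 0 := by
    rw [List.countP_eq_zero]
    intro x hx
    rw [PySem.List.mem_pyRange_one] at hx
    simp [hhi x hx.1 hx.2]
  omega
theorem sum_pyRange_extend (g : Int → Int) {a b a' b' : Int} (h1 : a' ≤ a) (h2 : a ≤ b)
    (h3 : b ≤ b') (hlo : ∀ x, a' ≤ x → x < a → g x = 0)
    (hhi : ∀ x, b ≤ x → x < b' → g x = 0) :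
    ((PySem.List.pyRange a' b' 1).map g).sum = ((PySem.List.pyRange a b 1).map g).sum := by
  rw [PySem.List.pyRange_one_append a' a b' h1 (h2.trans h3),
      PySem.List.pyRange_one_append a b b' h2 h3]
  rw [List.map_append, List.map_append, List.sum_append, List.sum_append]
  have z1 : ((PySem.List.pyRange a' a 1).map g).sum = 0 := by
    apply List.sum_eq_zero
    intro x hx
    simp only [List.mem_map] at hx
    obtain ⟨y, hy, rfl⟩ := hx
    rw [PySem.List.mem_pyRange_one] at hy
    exact hlo y hy.1 hy.2
  have z2 : ((PySem.List.pyRange b b' 1).map g).sum = 0 := by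
    apply List.sum_eq_zero
    intro x hx
    simp only [List.mem_map] at hx
    obtain ⟨y, hy, rfl⟩ := hx
    rw [PySem.List.mem_pyRange_one] at hy
    exact hhi y hy.1 hy.2
  rw [z1, z2]
  ring

theorem pvCnt_nested (data : List (List Int)) (r c s : Int) :
    pvCnt data r c s = ((PySem.List.pyRange 0 (data.length : Int) 1).map (fun i =>
      (((PySem.List.pyRange 0 (data.length : Int) 1).countP
        (fun j => decide (pvAt data i j = 1 ∧ |r - i - 1| + |c - j - 1| ≤ s))) : Int))).sum := by
  unfold pvCnt onesB
  rw [List.countP_flatMap, Nat.cast_list_sum, List.map_map]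
  congr 1
  apply List.map_congr_left
  intro i hi
  simp only [Function.comp]
  rw [List.countP_map, List.countP_filter]
  congr 1
  apply List.countP_congr
  intro j hj
  have e1 : r - 1 - i = r - i - 1 := by ring
  have e2 : c - 1 - j = c - j - 1 := by ring
  by_cases h1 : pvAt data i j = 1 <;> by_cases h2 : |r - i - 1| + |c - j - 1| ≤ s <;>
    simp [pvDist, e1, e2, h1, h2]

theorem pvCnt_window (data : List (List Int)) {r c s : Int} (hr1 : 1 ≤ r)
    (hr2 : r ≤ (data.length : Int)) (hc1 : 1 ≤ c) (hc2 : c ≤ (data.length : Int)) (hs : 0 ≤ s) :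
    pvCnt data r c s
      = ((PySem.List.pyRange (max 0 ((r - 1) - s)) (min (data.length : Int) (r + s)) 1).map
          (fun i =>
            (((PySem.List.pyRange (max 0 ((c - 1) - s)) (min (data.length : Int) (c + s)) 1).countP
              (fun j => decide (pvAt data i j = 1 ∧ |r - i - 1| + |c - j - 1| ≤ s))) : Int))).sum := by
  rw [pvCnt_nested]
  have hcols : ∀ i : Int,
      (PySem.List.pyRange 0 (data.length : Int) 1).countP
        (fun j => decide (pvAt data i j = 1 ∧ |r - i - 1| + |c - j - 1| ≤ s))
      = (PySem.List.pyRange (max 0 ((c - 1) - s)) (min (data.length : Int) (c + s)) 1).countP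
        (fun j => decide (pvAt data i j = 1 ∧ |r - i - 1| + |c - j - 1| ≤ s)) := by
    intro i
    apply countP_pyRange_extend _ (by omega) (by omega) (by omega)
    · intro j hj1 hj2
      simp only [decide_eq_false_iff_not]
      rintro ⟨-, h⟩
      have a1 := abs_nonneg (r - i - 1)
      have a2 : c - j - 1 ≤ |c - j - 1| := le_abs_self _
      omega
    · intro j hj1 hj2
      simp only [decide_eq_false_iff_not]
      rintro ⟨-, h⟩
      have a1 := abs_nonneg (r - i - 1)
      have a2 : -(c - j - 1) ≤ |c - j - 1| := neg_le_abs _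
      omega
  have hmap : ((PySem.List.pyRange 0 (data.length : Int) 1).map (fun i =>
      (((PySem.List.pyRange 0 (data.length : Int) 1).countP
        (fun j => decide (pvAt data i j = 1 ∧ |r - i - 1| + |c - j - 1| ≤ s))) : Int))).sum
      = ((PySem.List.pyRange 0 (data.length : Int) 1).map (fun i =>
      (((PySem.List.pyRange (max 0 ((c - 1) - s)) (min (data.length : Int) (c + s)) 1).countP
        (fun j => decide (pvAt data i j = 1 ∧ |r - i - 1| + |c - j - 1| ≤ s))) : Int))).sum := by
    congr 1
    apply List.map_congr_left
    intro i _
    rw [hcols i]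
  rw [hmap]
  apply sum_pyRange_extend _ (by omega) (by omega) (by omega)
  · intro i hi1 hi2
    have : (PySem.List.pyRange (max 0 ((c - 1) - s)) (min (data.length : Int) (c + s)) 1).countP
        (fun j => decide (pvAt data i j = 1 ∧ |r - i - 1| + |c - j - 1| ≤ s)) = 0 := by
      rw [List.countP_eq_zero]
      intro j _
      simp only [decide_eq_true_eq, not_and]
      intro _
      have a1 := abs_nonneg (c - j - 1)
      have a2 : r - i - 1 ≤ |r - i - 1| := le_abs_self _
      omega
    rw [this]
    rfl
  · intro i hi1 hi2
    have : (PySem.List.pyRange (max 0 ((c - 1) - s)) (min (data.length : Int) (c + s)) 1).countP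
        (fun j => decide (pvAt data i j = 1 ∧ |r - i - 1| + |c - j - 1| ≤ s)) = 0 := by
      rw [List.countP_eq_zero]
      intro j _
      simp only [decide_eq_true_eq, not_and]
      intro _
      have a1 := abs_nonneg (c - j - 1)
      have a2 : -(r - i - 1) ≤ |r - i - 1| := neg_le_abs _
      omega
    rw [this]
    rfl

theorem calcA_eq {data : List (List Int)} {r c s : Int} (hr1 : 1 ≤ r)
    (hr2 : r ≤ (data.length : Int)) (hc1 : 1 ≤ c) (hc2 : c ≤ (data.length : Int))
    (hs : 0 ≤ s) : calcA data r c s = pvCnt data r c s := by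
  by_cases h0 : s = 0
  · subst h0
    rw [pvCnt_window data hr1 hr2 hc1 hc2 le_rfl]
    unfold calcA
    have er : max 0 (r - 1 - 0) = r - 1 := by omega
    have ec : max 0 (c - 1 - 0) = c - 1 := by omega
    have er2 : min (data.length : Int) (r + 0) = r := by omega
    have ec2 : min (data.length : Int) (c + 0) = c := by omega
    have hrow : PySem.List.pyRange (r - 1) r 1 = [r - 1] := by
      have h := PySem.List.pyRange_one_singleton (a := r - 1)
      rw [show r - 1 + 1 = r by ring] at h
      exact h
    have hcol : PySem.List.pyRange (c - 1) c 1 = [c - 1] := by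
      have h := PySem.List.pyRange_one_singleton (a := c - 1)
      rw [show c - 1 + 1 = c by ring] at h
      exact h
    rw [if_pos rfl, er, ec, er2, ec2, hrow, hcol]
    by_cases h1 : pvAt data (r - 1) (c - 1) = 1 <;>
      simp [List.countP_singleton, h1]
  · rw [pvCnt_window data hr1 hr2 hc1 hc2 hs]
    unfold calcA
    rw [if_neg h0]
    rw [PySem.List.foldl_congr_mem (g := fun (result : Int) i => result +
      (((PySem.List.pyRange (max 0 ((c - 1) - s)) (min (data.length : Int) (c + s)) 1).countP
        (fun j => decide (pvAt data i j = 1 ∧ |r - i - 1| + |c - j - 1| ≤ s))) : Int))]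
    · rw [PySem.List.foldl_add]
      ring
    · intro acc i _
      rw [PySem.List.foldl_ite_add_one]

theorem histB_getD (data : List (List Int)) (r c d : Int) :
    (histB (onesB data) r c).getD d 0
      = ((onesB data).countP (fun p => pvDist r c p == d) : Int) := by
  unfold histB
  rw [← List.foldl_map (f := fun p : Int × Int => |r - 1 - p.1| + |c - 1 - p.2|)
        (g := fun (h : PySem.Dict Int Int) x => h.insert x (h.getD x 0 + 1))]
  rw [PySem.Dict.getD_foldl_insert_add_one]
  rw [PySem.Dict.getD_empty, List.count_eq_countP, List.countP_map]
  simp only [zero_add]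
  congr 1

theorem getValueA_eq (data : List (List Int)) (value : Int) :
    getValueA data value = ((onesB data).length : Int) * value := by
  unfold getValueA onesB
  rw [PySem.List.foldl_congr_mem
    (g := fun res i => res + (((PySem.List.pyRange 0 (data.length : Int) 1).filter
          (fun j => pvAt data i j == 1)).length : Int) * value)]
  · rw [PySem.List.foldl_add]
    simp only [List.length_flatMap]
    rw [Nat.cast_list_sum, List.map_map]
    rw [← List.sum_map_mul_right]
    simp [Function.comp]
  · intro acc i _
    rw [PySem.List.foldl_ite_eq_foldl_filter]
    rw [PySem.List.foldl_add (g := fun _ => value)]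
    rw [PySem.List.sum_map_const_int]
    have hpred : (fun x => decide (pvAt data i x = 1)) = (fun j => pvAt data i j == 1) := by
      funext j
      by_cases h : pvAt data i j = 1 <;> simp [h]
    rw [hpred]

theorem whileA_tail (data : List (List Int)) (value r c M : Int) (hr1 : 1 ≤ r)
    (hr2 : r ≤ (data.length : Int)) (hc1 : 1 ≤ c) (hc2 : c ≤ (data.length : Int)) :
    ∀ (k : Nat) (s₀ acc : Int), (M + 1 - s₀).toNat = k →
      2 * (data.length : Int) - 1 ≤ s₀ →
      (pvCnt data r c (2 * (data.length : Int) - 2) * value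
          ≥ getCostB (2 * (data.length : Int) - 2) →
        pvCnt data r c (2 * (data.length : Int) - 2) ≤ acc) →
      whileA data value M r c s₀ acc = acc := by
  intro k
  induction k using Nat.strong_induction_on with
  | _ k ih =>
    intro s₀ acc hk hs hacc
    rw [whileA]
    by_cases h : getCostA s₀ > M
    · rw [if_pos h]
    · rw [if_neg h]
      push_neg at h
      have hn1 : 1 ≤ (data.length : Int) := by omega
      have hs0 : 0 ≤ s₀ := by omega
      have hcalc : calcA data r c s₀ = pvCnt data r c (2 * (data.length : Int) - 2) := by
        rw [calcA_eq hr1 hr2 hc1 hc2 hs0, pvCnt_cap hr1 hr2 hc1 hc2 (by omega)]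
      have hcost : getCostB (2 * (data.length : Int) - 2) ≤ getCostA s₀ := by
        have := getCostB_mono (t := 2 * (data.length : Int) - 2) (s := s₀) (by omega) (by omega)
        simpa [getCostA, getCostB] using this
      have hacc' : (if calcA data r c s₀ * value ≥ getCostA s₀
            then max (calcA data r c s₀) acc else acc) = acc := by
        split_ifs with h2
        · rw [hcalc] at h2 ⊢
          have := hacc (by omega)
          omega
        · rfl
      rw [hacc']
      have hge := getCostA_ge s₀
      exact ih (M + 1 - (s₀ + 1)).toNat (by omega) (s₀ + 1) acc rfl (by omega) hacc

theorem whileA_eq_fold (data : List (List Int)) (value r c : Int) (M : Int) (hr1 : 1 ≤ r)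
    (hr2 : r ≤ (data.length : Int)) (hc1 : 1 ≤ c) (hc2 : c ≤ (data.length : Int)) :
    ∀ (k : Nat) (s₀ acc : Int), (2 * (data.length : Int) - 1 - s₀).toNat = k →
      0 ≤ s₀ → s₀ ≤ 2 * (data.length : Int) - 1 →
      (s₀ = 2 * (data.length : Int) - 1 →
        pvCnt data r c (2 * (data.length : Int) - 2) * value
            ≥ getCostB (2 * (data.length : Int) - 2) →
        pvCnt data r c (2 * (data.length : Int) - 2) ≤ acc) →
      whileA data value M r c s₀ acc
        = (PySem.List.pyRange s₀ (2 * (data.length : Int) - 1) 1).foldl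
            (pvStep data value M r c) acc := by
  intro k
  induction k using Nat.strong_induction_on with
  | _ k ih =>
    intro s₀ acc hk hs0 hs1 hacc
    by_cases hend : s₀ = 2 * (data.length : Int) - 1
    · rw [PySem.List.pyRange_one_eq_nil (by omega)]
      simp only [List.foldl_nil]
      exact whileA_tail data value r c M hr1 hr2 hc1 hc2 _ s₀ acc rfl (by omega) (hacc hend)
    · rw [whileA]
      by_cases h : getCostA s₀ > M
      · rw [if_pos h]
        rw [PySem.List.foldl_congr_mem (g := fun acc _ => acc), PySem.List.foldl_ignore]
        intro acc' d hd
        rw [PySem.List.mem_pyRange_one] at hd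
        unfold pvStep
        have : ¬ getCostB d ≤ M := by
          have := getCostB_mono (t := s₀) (s := d) hs0 (by omega)
          simp only [getCostA, getCostB] at *
          omega
        simp [this]
      · rw [if_neg h]
        push_neg at h
        have hstep : (if calcA data r c s₀ * value ≥ getCostA s₀
              then max (calcA data r c s₀) acc else acc)
            = pvStep data value M r c acc s₀ := by
          unfold pvStep
          rw [calcA_eq hr1 hr2 hc1 hc2 hs0]
          have hcm : getCostB s₀ ≤ M := by simpa [getCostA, getCostB] using h
          by_cases h2 : pvCnt data r c s₀ * value ≥ getCostB s₀
          · rw [if_pos (by simpa [getCostA, getCostB] using h2), if_pos ⟨hcm, h2⟩]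
            exact max_comm _ _
          · rw [if_neg (by simpa [getCostA, getCostB] using h2), if_neg (by tauto)]
        rw [hstep]
        rw [PySem.List.pyRange_one_cons (by omega), List.foldl_cons]
        apply ih (2 * (data.length : Int) - 1 - (s₀ + 1)).toNat (by omega) (s₀ + 1) _ rfl
          (by omega) (by omega)
        intro hend2 hcond
        unfold pvStep
        have hcap : s₀ = 2 * (data.length : Int) - 2 := by omega
        rw [← hcap] at hcond ⊢
        have hMcost : getCostB s₀ ≤ M := by simpa [getCostA, getCostB] using h
        rw [if_pos ⟨hMcost, hcond⟩]
        exact le_max_right _ _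

theorem bfold_eq_fold (data : List (List Int)) (value r c M : Int) :
    ∀ (k : Nat) (d₀ best : Int), (2 * (data.length : Int) - 1 - d₀).toNat = k →
    ((PySem.List.pyRange d₀ (2 * (data.length : Int) - 1) 1).foldl (fun (st : Int × Int) d =>
        let running := st.1 + (histB (onesB data) r c).getD d 0
        (running,
         if getCostB d ≤ M ∧ running * value ≥ getCostB d then max st.2 running
         else st.2)) ((pvCnt data r c (d₀ - 1)), best)).2
      = (PySem.List.pyRange d₀ (2 * (data.length : Int) - 1) 1).foldl
          (pvStep data value M r c) best := by
  intro k
  induction k using Nat.strong_induction_on with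
  | _ k ih =>
    intro d₀ best hk
    by_cases hend : 2 * (data.length : Int) - 1 ≤ d₀
    · rw [PySem.List.pyRange_one_eq_nil (by omega)]
      rfl
    · rw [PySem.List.pyRange_one_cons (by omega), List.foldl_cons, List.foldl_cons]
      have hrun : pvCnt data r c (d₀ - 1) + (histB (onesB data) r c).getD d₀ 0
          = pvCnt data r c d₀ := by
        rw [histB_getD, ← pvCnt_succ]
      simp only []
      rw [hrun]
      have hstep : (if getCostB d₀ ≤ M ∧ pvCnt data r c d₀ * value ≥ getCostB d₀
            then max best (pvCnt data r c d₀) else best) = pvStep data value M r c best d₀ := rfl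
      have := ih (2 * (data.length : Int) - 1 - (d₀ + 1)).toNat (by omega) (d₀ + 1)
        (pvStep data value M r c best d₀) rfl
      rw [show d₀ + 1 - 1 = d₀ by ring] at this
      rw [← this]
      congr 1

theorem func_eq (data : List (List Int)) (size value : Int) :
    func data size value = func_alt data size value := by
  unfold func func_alt
  dsimp only
  rw [getValueA_eq]
  apply PySem.List.foldl_congr_mem
  intro acc i hi
  apply PySem.List.foldl_congr_mem
  intro acc' j hj
  rw [PySem.List.mem_pyRange_one] at hi hj
  have hb := bfold_eq_fold data value i j (((onesB data).length : Int) * value)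
    (2 * (data.length : Int) - 1 - 0).toNat 0 acc' rfl
  rw [pvCnt_neg data i j (0 - 1) (by omega)] at hb
  rw [whileA_eq_fold data value i j (((onesB data).length : Int) * value)
    (by omega) (by omega) (by omega) (by omega)
    (2 * (data.length : Int) - 1 - 0).toNat 0 acc' rfl (by omega) (by omega) (by omega)]
  exact hb.symm

-- ===== VERDICT (by name: the statement is the Claim_ definition above) =====
theorem func_spec : Claim_equal_func := by
  intro data size value _ _
  unfold Spec_func
  exact func_eq data size value
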